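-- pv_equiv track=rewrite | github.com/ajitnilakantan/puzzles | jane-street-puzzles/js_2024_05_number_cross_4/number_cross_4.py | is_product_ending_one
-- ===== SOURCE A (Python) =====
-- def is_product_ending_one(n: int) -> bool:
--     r = 1
--     while n:
--         d = n % 10
--         if d != 1 and d != 3 and d != 7 and d != 9:
--             return False
--         r, n = r * d, n // 10
--     return r % 10 == 1
-- ===== SOURCE B (Python) =====
-- _LOG3 = {1: 0, 3: 1, 7: 3, 9: 2}  # discrete log base 3 in the group {1,3,9,7} mod 10
--
--
-- def is_product_ending_one(n: int) -> bool:
--     t = 0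
--     while n:
--         e = _LOG3.get(n % 10)
--         if e is None:
--             return False
--         t += e
--         n //= 10
--     return t % 4 == 0
-- ===== Notes on version B (the rewrite author's own statement) =====
-- stated objective: alternative
-- what changed: B never forms the digit product: it maintains an additive discrete-log exponent (1,3,9,7 = 3^0,3^1,3^2,3^3 mod 10) looked up per digit and tests total % 4 == 0 at the end, instead of A's running multiplication and final r % 10 == 1.
import Mathlib
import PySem

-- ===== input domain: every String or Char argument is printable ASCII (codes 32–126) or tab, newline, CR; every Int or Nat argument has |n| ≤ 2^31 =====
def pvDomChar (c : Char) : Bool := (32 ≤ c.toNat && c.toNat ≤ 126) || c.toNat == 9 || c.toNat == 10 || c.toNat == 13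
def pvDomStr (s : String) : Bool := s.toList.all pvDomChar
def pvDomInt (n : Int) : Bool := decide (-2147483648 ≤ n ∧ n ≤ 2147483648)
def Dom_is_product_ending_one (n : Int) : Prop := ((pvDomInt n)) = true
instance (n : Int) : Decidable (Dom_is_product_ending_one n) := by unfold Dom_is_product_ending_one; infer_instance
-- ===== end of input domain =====

-- B replaces A's running digit product by an additive discrete-log exponent mod 4 (alternative decomposition; not claimed faster).

-- ===== PORT A =====
-- the while loop, made total with a fuel counter (64 ≥ any iteration count reached inside Pre_)
def pvGoA (fuel : Nat) (r n : Int) : Bool :=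
  match fuel with
  | 0 => false   -- unreachable inside Pre_ (the Python loop diverges outside it)
  | fuel + 1 =>
    if n ≠ 0 then
      let d := PySem.Int.mod n 10
      if d ≠ 1 ∧ d ≠ 3 ∧ d ≠ 7 ∧ d ≠ 9 then false
      else pvGoA fuel (r * d) (PySem.Int.floordiv n 10)
    else decide (PySem.Int.mod r 10 = 1)

def is_product_ending_one (n : Int) : Bool := pvGoA 64 1 n

-- ===== PORT B =====
def pvLog3 : PySem.Dict Int Int := PySem.Dict.ofList [(1, 0), (3, 1), (7, 3), (9, 2)]

def pvGoB (fuel : Nat) (t n : Int) : Bool :=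
  match fuel with
  | 0 => true    -- unreachable inside Pre_ (the Python loop diverges outside it)
  | fuel + 1 =>
    if n ≠ 0 then
      match PySem.Dict.get? pvLog3 (PySem.Int.mod n 10) with
      | none => false
      | some e => pvGoB fuel (t + e) (PySem.Int.floordiv n 10)
    else decide (PySem.Int.mod t 4 = 0)

def is_product_ending_one_alt (n : Int) : Bool := pvGoB 64 0 n

-- ===== PRECONDITION & SPEC =====
-- Pre_ excludes EXACTLY the inputs on which the Python loop never returns: those negative n whose
-- residues n // 10^k % 10 all lie in {1,3,7,9} (once the chain reaches -1 the residue is 9 forever,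
-- so the loop never exits).  The bound k < 10 excludes nothing inside Dom: |n| ≤ 2^31 < 10^10, so for
-- negative n the quotient n // 10^10 is already -1 and every residue at position k ≥ 10 equals 9
-- (never a loop exit); hence any residue outside {1,3,7,9} occurs at some k < 10, and Pre_ holds on
-- every Dom input on which A returns.
def Pre_is_product_ending_one (n : Int) : Prop :=
  0 ≤ n ∨ ∃ k, k < 10 ∧
    ¬(PySem.Int.mod (PySem.Int.floordiv n (10 ^ k)) 10 = 1 ∨
      PySem.Int.mod (PySem.Int.floordiv n (10 ^ k)) 10 = 3 ∨
      PySem.Int.mod (PySem.Int.floordiv n (10 ^ k)) 10 = 7 ∨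
      PySem.Int.mod (PySem.Int.floordiv n (10 ^ k)) 10 = 9)
instance (n : Int) : Decidable (Pre_is_product_ending_one n) := by
  unfold Pre_is_product_ending_one; infer_instance

def pvWitness_is_product_ending_one : Int := (137)

def Spec_is_product_ending_one (n : Int) (out : Bool) : Prop := out = is_product_ending_one_alt n
instance (n : Int) (out : Bool) : Decidable (Spec_is_product_ending_one n out) := by
  unfold Spec_is_product_ending_one; infer_instance

-- ===== CLAIM (what is proved, stated in full; the proofs are below) =====
def Claim_equal_is_product_ending_one : Prop := ∀ (n : Int), Dom_is_product_ending_one n → Pre_is_product_ending_one n → Spec_is_product_ending_one n (is_product_ending_one n)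

-- ===== LEMMAS AND PROOFS =====

-- 3 ^ a mod 10 for a = 0,1,2,3
def pvThree (a : Int) : Int := if a = 0 then 1 else if a = 1 then 3 else if a = 2 then 9 else 7

-- the loop returns within `fuel` iterations
def pvTerm : Nat → Int → Prop
  | 0, _ => False
  | fuel + 1, n => n = 0 ∨
      ¬(PySem.Int.mod n 10 = 1 ∨ PySem.Int.mod n 10 = 3 ∨
        PySem.Int.mod n 10 = 7 ∨ PySem.Int.mod n 10 = 9) ∨
      pvTerm fuel (PySem.Int.floordiv n 10)

lemma pvmod10 (a : Int) : PySem.Int.mod a 10 = a % 10 :=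
  PySem.Int.mod_eq_emod_of_pos (by norm_num)

lemma pvmod4 (a : Int) : PySem.Int.mod a 4 = a % 4 :=
  PySem.Int.mod_eq_emod_of_pos (by norm_num)

lemma pvdiv10 (a : Int) : PySem.Int.floordiv a 10 = a / 10 :=
  PySem.Int.floordiv_eq_ediv_of_pos (by norm_num)

-- loop invariant: r % 10 is 3 ^ (t % 4) mod 10, so the two loop bodies stay in lock step
lemma pvGo_eq : ∀ (fuel : Nat) (n r t : Int),
    r % 10 = pvThree (t % 4) → pvTerm fuel n → pvGoA fuel r n = pvGoB fuel t n := by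
  intro fuel
  induction fuel with
  | zero => intro n r t _ hterm; exact hterm.elim
  | succ fuel ih =>
    intro n r t hrel hterm
    by_cases hn : n = 0
    · -- loop exit: r % 10 == 1  ↔  t % 4 == 0
      simp only [pvGoA, pvGoB, hn, ne_eq, not_true_eq_false, if_false, pvmod10, pvmod4]
      have ht4 : t % 4 = 0 ∨ t % 4 = 1 ∨ t % 4 = 2 ∨ t % 4 = 3 := by omega
      rcases ht4 with h | h | h | h <;> rw [h] at hrel <;>
        simp [pvThree] at hrel <;> simp [hrel, h]
    · have hd : 0 ≤ PySem.Int.mod n 10 ∧ PySem.Int.mod n 10 < 10 := by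
        rw [pvmod10]; omega
      have ht4 : t % 4 = 0 ∨ t % 4 = 1 ∨ t % 4 = 2 ∨ t % 4 = 3 := by omega
      have hterm' : ¬(PySem.Int.mod n 10 = 1 ∨ PySem.Int.mod n 10 = 3 ∨
          PySem.Int.mod n 10 = 7 ∨ PySem.Int.mod n 10 = 9) ∨
          pvTerm fuel (PySem.Int.floordiv n 10) := by
        simp only [pvTerm] at hterm; tauto
      have hgood : ∀ c : Int, c = 1 ∨ c = 3 ∨ c = 7 ∨ c = 9 → PySem.Int.mod n 10 = c →
          pvTerm fuel (PySem.Int.floordiv n 10) := by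
        intro c hc hv
        rcases hterm' with hb | hok
        · exact absurd (by rw [hv]; exact hc) hb
        · exact hok
      simp only [pvGoA, pvGoB, if_pos hn]
      have hcases : PySem.Int.mod n 10 = 0 ∨ PySem.Int.mod n 10 = 1 ∨ PySem.Int.mod n 10 = 2 ∨
          PySem.Int.mod n 10 = 3 ∨ PySem.Int.mod n 10 = 4 ∨ PySem.Int.mod n 10 = 5 ∨
          PySem.Int.mod n 10 = 6 ∨ PySem.Int.mod n 10 = 7 ∨ PySem.Int.mod n 10 = 8 ∨
          PySem.Int.mod n 10 = 9 := by omega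
      -- on 0,2,4,5,6,8 both sides return False; on 1,3,7,9 both recurse and the invariant is restored
      rcases hcases with h | h | h | h | h | h | h | h | h | h
      · rw [h, show PySem.Dict.get? pvLog3 0 = none from by decide, if_pos (by norm_num)]
      · rw [h, show PySem.Dict.get? pvLog3 1 = some 0 from by decide, if_neg (by norm_num)]
        simp only [pvdiv10]
        exact ih _ _ _
          (by rw [Int.mul_emod, hrel, Int.add_emod]; rcases ht4 with h4 | h4 | h4 | h4 <;> rw [h4] <;> decide)
          (by simpa [pvdiv10] using hgood 1 (by norm_num) h)
      · rw [h, show PySem.Dict.get? pvLog3 2 = none from by decide, if_pos (by norm_num)]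
      · rw [h, show PySem.Dict.get? pvLog3 3 = some 1 from by decide, if_neg (by norm_num)]
        simp only [pvdiv10]
        exact ih _ _ _
          (by rw [Int.mul_emod, hrel, Int.add_emod]; rcases ht4 with h4 | h4 | h4 | h4 <;> rw [h4] <;> decide)
          (by simpa [pvdiv10] using hgood 3 (by norm_num) h)
      · rw [h, show PySem.Dict.get? pvLog3 4 = none from by decide, if_pos (by norm_num)]
      · rw [h, show PySem.Dict.get? pvLog3 5 = none from by decide, if_pos (by norm_num)]
      · rw [h, show PySem.Dict.get? pvLog3 6 = none from by decide, if_pos (by norm_num)]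
      · rw [h, show PySem.Dict.get? pvLog3 7 = some 3 from by decide, if_neg (by norm_num)]
        simp only [pvdiv10]
        exact ih _ _ _
          (by rw [Int.mul_emod, hrel, Int.add_emod]; rcases ht4 with h4 | h4 | h4 | h4 <;> rw [h4] <;> decide)
          (by simpa [pvdiv10] using hgood 7 (by norm_num) h)
      · rw [h, show PySem.Dict.get? pvLog3 8 = none from by decide, if_pos (by norm_num)]
      · rw [h, show PySem.Dict.get? pvLog3 9 = some 2 from by decide, if_neg (by norm_num)]
        simp only [pvdiv10]
        exact ih _ _ _
          (by rw [Int.mul_emod, hrel, Int.add_emod]; rcases ht4 with h4 | h4 | h4 | h4 <;> rw [h4] <;> decide)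
          (by simpa [pvdiv10] using hgood 9 (by norm_num) h)

lemma pvdiv_comp (n : Int) (k : Nat) :
    PySem.Int.floordiv (PySem.Int.floordiv n 10) (10 ^ k) = PySem.Int.floordiv n (10 ^ (k + 1)) := by
  rw [pvdiv10, PySem.Int.floordiv_eq_ediv_of_pos (by positivity),
      PySem.Int.floordiv_eq_ediv_of_pos (by positivity),
      Int.ediv_ediv_of_nonneg (by norm_num), pow_succ, mul_comm]

-- a negative n with a residue outside {1,3,7,9} at position k exits (with False) within k+1 steps
lemma pvTerm_neg : ∀ (k : Nat) (n : Int), n < 0 →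
    ¬(PySem.Int.mod (PySem.Int.floordiv n (10 ^ k)) 10 = 1 ∨
      PySem.Int.mod (PySem.Int.floordiv n (10 ^ k)) 10 = 3 ∨
      PySem.Int.mod (PySem.Int.floordiv n (10 ^ k)) 10 = 7 ∨
      PySem.Int.mod (PySem.Int.floordiv n (10 ^ k)) 10 = 9) →
    ∀ fuel : Nat, k < fuel → pvTerm fuel n := by
  intro k
  induction k with
  | zero =>
    intro n _ hbad fuel hf
    obtain ⟨f, rfl⟩ : ∃ f, fuel = f + 1 := ⟨fuel - 1, by omega⟩
    refine Or.inr (Or.inl ?_)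
    have h1 : PySem.Int.floordiv n (10 ^ 0) = n := by
      rw [pow_zero, PySem.Int.floordiv_eq_ediv_of_pos (by norm_num), Int.ediv_one]
    rwa [h1] at hbad
  | succ k ih =>
    intro n hneg hbad fuel hf
    obtain ⟨f, rfl⟩ : ∃ f, fuel = f + 1 := ⟨fuel - 1, by omega⟩
    by_cases hd : PySem.Int.mod n 10 = 1 ∨ PySem.Int.mod n 10 = 3 ∨
        PySem.Int.mod n 10 = 7 ∨ PySem.Int.mod n 10 = 9
    · refine Or.inr (Or.inr ?_)
      apply ih
      · rw [pvdiv10]; omega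
      · rwa [pvdiv_comp]
      · omega
    · exact Or.inr (Or.inl hd)

lemma pvTerm_nonneg : ∀ (fuel : Nat) (n : Int), 0 ≤ n → n < 10 ^ fuel → pvTerm (fuel + 1) n := by
  intro fuel
  induction fuel with
  | zero => intro n h1 h2; exact Or.inl (by omega)
  | succ fuel ih =>
    intro n h1 h2
    by_cases hn : n = 0
    · exact Or.inl hn
    · refine Or.inr (Or.inr (ih _ ?_ ?_))
      · rw [pvdiv10]; omega
      · rw [pvdiv10]
        have h3 : (10:Int) ^ (fuel + 1) = 10 * 10 ^ fuel := by ring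
        rw [h3] at h2
        omega

-- ===== VERDICT (by name: the statement is the Claim_ definition above) =====
theorem is_product_ending_one_spec : Claim_equal_is_product_ending_one := by
  intro n hdom hpre
  unfold Spec_is_product_ending_one is_product_ending_one is_product_ending_one_alt
  apply pvGo_eq 64 n 1 0 (by decide)
  have hbound : n ≤ 2147483648 := by
    unfold Dom_is_product_ending_one pvDomInt at hdom
    simp at hdom
    exact hdom.2
  rcases hpre with hpos | ⟨k, hk, hbad⟩
  · exact pvTerm_nonneg 63 n hpos (by calc n ≤ 2147483648 := hbound
      _ < 10 ^ 63 := by norm_num)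
  · by_cases hneg : n < 0
    · exact pvTerm_neg k n hneg hbad 64 (by omega)
    · exact pvTerm_nonneg 63 n (by omega) (by calc n ≤ 2147483648 := hbound
        _ < 10 ^ 63 := by norm_num)
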